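-- pv_equiv track=rewrite | github.com/ASSERT-KTH/Mokav | experiments/pynguin/c4b/single-return/generated_tests/src_215/8/src_215.py | func
-- ===== SOURCE A (Python) =====
-- def func(*args):
--
-- 	k = int(args[0])
-- 	l = int(args[1])
-- 	m = int(args[2])
-- 	n = int(args[3])
-- 	d = int(args[4])
-- 	hurt = 0
-- 	count = 1
-- 	while (count <= d):
-- 	    if (((count % k) == 0) or ((count % m) == 0) or ((count % n) == 0) or ((count % l) == 0)):
-- 	        hurt += 1
-- 	    count = (count + 1)
-- 	return(hurt)
-- ===== SOURCE B (Python) =====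
-- def func(*args):
--     # Closed-form inclusion-exclusion over the four divisors; O(1) instead of A's O(d) scan.
--     k = int(args[0])
--     l = int(args[1])
--     m = int(args[2])
--     n = int(args[3])
--     d = int(args[4])
--     if d <= 0:
--         return 0
--
--     def g(a, b):
--         while b:
--             a, b = b, a % b
--         return abs(a)
--
--     def lcm(a, b):
--         return abs(a * b) // g(a, b)
--
--     def cnt(x):
--         return d // x
--
--     return (cnt(abs(k)) + cnt(abs(l)) + cnt(abs(m)) + cnt(abs(n))
--             - cnt(lcm(k, l)) - cnt(lcm(k, m)) - cnt(lcm(k, n))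
--             - cnt(lcm(l, m)) - cnt(lcm(l, n)) - cnt(lcm(m, n))
--             + cnt(lcm(lcm(k, l), m)) + cnt(lcm(lcm(k, l), n))
--             + cnt(lcm(lcm(k, m), n)) + cnt(lcm(lcm(l, m), n))
--             - cnt(lcm(lcm(lcm(k, l), m), n)))
-- ===== Notes on version B (the rewrite author's own statement) =====
-- stated objective: faster
-- what changed: Replaced A's O(d) scan of 1..d testing each number's divisibility by a closed-form inclusion-exclusion sum of 15 floor divisions by (absolute values and) LCMs of the four divisors.
-- outside the precondition, e.g. on func(1, 2, 0, 3, 5): A returns 5, B raises ZeroDivisionError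
import Mathlib
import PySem

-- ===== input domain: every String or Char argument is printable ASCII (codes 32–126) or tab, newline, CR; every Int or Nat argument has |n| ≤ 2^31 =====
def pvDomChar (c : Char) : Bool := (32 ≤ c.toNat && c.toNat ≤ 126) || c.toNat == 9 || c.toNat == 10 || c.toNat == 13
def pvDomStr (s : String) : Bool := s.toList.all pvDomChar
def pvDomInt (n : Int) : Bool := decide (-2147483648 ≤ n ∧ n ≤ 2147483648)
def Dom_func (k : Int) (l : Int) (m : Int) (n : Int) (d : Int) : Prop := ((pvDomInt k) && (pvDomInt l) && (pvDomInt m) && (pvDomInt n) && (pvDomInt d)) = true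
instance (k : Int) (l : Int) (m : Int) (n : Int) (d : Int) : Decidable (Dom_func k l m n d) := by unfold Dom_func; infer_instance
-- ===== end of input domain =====

-- B replaces A's scan of 1..d by an inclusion-exclusion sum of 15 floor divisions (objective: faster).

-- ===== PORT A =====
-- the while loop of A: count runs 1..d, hurt counts the hits
def funcLoop (k l m n d : Int) (count hurt : Int) : Int :=
  if _h : count ≤ d then
    funcLoop k l m n d (count + 1)
      (if PySem.Int.mod count k = 0 ∨ PySem.Int.mod count m = 0 ∨ PySem.Int.mod count n = 0 ∨ PySem.Int.mod count l = 0
       then hurt + 1 else hurt)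
  else hurt
termination_by (d + 1 - count).toNat
decreasing_by omega

def func (k : Int) (l : Int) (m : Int) (n : Int) (d : Int) : Int :=
  funcLoop k l m n d 1 0

-- ===== PORT B =====
-- Python's `while b: a, b = b, a % b` Euclid loop of g(a, b) (final a, before the abs)
def pyGcdAux (a b : Int) : Int :=
  if h : b = 0 then a else pyGcdAux b (PySem.Int.mod a b)
termination_by b.natAbs
decreasing_by
  rcases lt_or_gt_of_ne h with hb | hb
  · have h1 := PySem.Int.mod_neg_bounds a hb
    omega
  · have h1 := PySem.Int.mod_nonneg a hb
    have h2 := PySem.Int.mod_lt a hb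
    omega

-- g(a, b) of Source B: Euclid loop then abs
def pyG (a b : Int) : Int := |pyGcdAux a b|

-- lcm(a, b) of Source B: abs(a*b) // g(a,b)
def pyLcm (a b : Int) : Int := PySem.Int.floordiv |a * b| (pyG a b)

def func_alt (k : Int) (l : Int) (m : Int) (n : Int) (d : Int) : Int :=
  if d ≤ 0 then 0
  else
    let cnt := fun x => PySem.Int.floordiv d x
    cnt |k| + cnt |l| + cnt |m| + cnt |n|
      - cnt (pyLcm k l) - cnt (pyLcm k m) - cnt (pyLcm k n)
      - cnt (pyLcm l m) - cnt (pyLcm l n) - cnt (pyLcm m n)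
      + cnt (pyLcm (pyLcm k l) m) + cnt (pyLcm (pyLcm k l) n)
      + cnt (pyLcm (pyLcm k m) n) + cnt (pyLcm (pyLcm l m) n)
      - cnt (pyLcm (pyLcm (pyLcm k l) m) n)

-- ===== PRECONDITION & SPEC =====
-- Pre_ excludes inputs with a zero divisor when d ≥ 1: there A raises ZeroDivisionError unless an
-- earlier clause of its short-circuit `or` happens to hit first, so A's behaviour on zero divisors
-- is clause-order-accidental (B raises ZeroDivisionError on all of them).
def Pre_func (k : Int) (l : Int) (m : Int) (n : Int) (d : Int) : Prop :=
  1 ≤ d → (k ≠ 0 ∧ l ≠ 0 ∧ m ≠ 0 ∧ n ≠ 0)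
instance (k : Int) (l : Int) (m : Int) (n : Int) (d : Int) : Decidable (Pre_func k l m n d) := by
  unfold Pre_func; infer_instance

def pvWitness_func : Int × Int × Int × Int × Int := (2, 3, 5, 7, 10)

def Spec_func (k : Int) (l : Int) (m : Int) (n : Int) (d : Int) (out : Int) : Prop := out = func_alt k l m n d
instance (k : Int) (l : Int) (m : Int) (n : Int) (d : Int) (out : Int) : Decidable (Spec_func k l m n d out) := by unfold Spec_func; infer_instance

-- ===== CLAIM (what is proved, stated in full; the proofs are below) =====
def Claim_equal_func : Prop := ∀ (k : Int) (l : Int) (m : Int) (n : Int) (d : Int), Dom_func k l m n d → Pre_func k l m n d → Spec_func k l m n d (func k l m n d)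

-- ===== LEMMAS AND PROOFS =====

-- the divisibility test of A's loop body at value c
abbrev hitP (k l m n c : Int) : Prop :=
  PySem.Int.mod c k = 0 ∨ PySem.Int.mod c m = 0 ∨ PySem.Int.mod c n = 0 ∨ PySem.Int.mod c l = 0

-- the Euclid loop computes the (nonnegative) gcd
theorem pyG_eq (a b : Int) : pyG a b = (Int.gcd a b : Int) := by
  unfold pyG
  fun_induction pyGcdAux a b with
  | case1 a =>
    rw [Int.gcd_zero_right]
    exact Int.abs_eq_natAbs a
  | case2 a b hb ih =>
    rw [ih]
    have hm : a + b * (-(PySem.Int.floordiv a b)) = PySem.Int.mod a b := by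
      linear_combination (-1 : ℤ) * (PySem.Int.floordiv_mul_add_mod a b)
    have : Int.gcd b (PySem.Int.mod a b) = Int.gcd a b := by
      rw [← hm, Int.gcd_add_mul_left_right, Int.gcd_comm]
    rw [this]

theorem pyLcm_eq (a b : Int) (ha : a ≠ 0) (hb : b ≠ 0) : pyLcm a b = (Int.lcm a b : Int) := by
  unfold pyLcm
  rw [pyG_eq]
  have habs : |a * b| = ((a.natAbs * b.natAbs : Nat) : Int) := by
    rw [Int.abs_eq_natAbs, Int.natAbs_mul]
  rw [habs, PySem.Int.floordiv_natCast]
  have hg : Int.gcd a b ≠ 0 := by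
    simp [Int.gcd_eq_zero_iff, ha, hb]
  have hml : Int.gcd a b * Int.lcm a b = a.natAbs * b.natAbs := Nat.gcd_mul_lcm a.natAbs b.natAbs
  rw [← hml, Nat.mul_div_cancel_left _ (Nat.pos_of_ne_zero hg)]

theorem pyLcm_ne_zero (a b : Int) (ha : a ≠ 0) (hb : b ≠ 0) : pyLcm a b ≠ 0 := by
  rw [pyLcm_eq a b ha hb]
  have := Int.lcm_ne_zero ha hb
  exact_mod_cast this

theorem pyLcm_pos (a b : Int) (ha : a ≠ 0) (hb : b ≠ 0) : 0 < pyLcm a b := by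
  have h1 := pyLcm_ne_zero a b ha hb
  rw [pyLcm_eq a b ha hb] at h1 ⊢
  omega

theorem pyLcm_dvd_iff (a b x : Int) (ha : a ≠ 0) (hb : b ≠ 0) :
    pyLcm a b ∣ x ↔ (a ∣ x ∧ b ∣ x) := by
  rw [pyLcm_eq a b ha hb, Int.coe_lcm]
  exact lcm_dvd_iff

-- floor-count step: for positive x, d // x − (d−1) // x is the indicator of x ∣ d
theorem cnt_step (d x : Int) (hx : 0 < x) :
    PySem.Int.floordiv d x = PySem.Int.floordiv (d - 1) x + (if x ∣ d then 1 else 0) := by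
  rw [PySem.Int.floordiv_eq_ediv_of_pos hx, PySem.Int.floordiv_eq_ediv_of_pos hx]
  by_cases h : x ∣ d
  · obtain ⟨q, rfl⟩ := h
    rw [Int.mul_ediv_cancel_left q (by omega)]
    have e : x * q - 1 = (x - 1) + x * (q - 1) := by ring
    rw [e, Int.add_mul_ediv_left _ _ (by omega : x ≠ 0), Int.ediv_eq_zero_of_lt (by omega) (by omega)]
    simp
  · have hq : x * (d / x) + d % x = d := Int.mul_ediv_add_emod d x
    have hr0 : 0 ≤ d % x := Int.emod_nonneg d (by omega)
    have hrx : d % x < x := Int.emod_lt_of_pos d hx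
    have hrne : d % x ≠ 0 := fun hc => h (Int.dvd_of_emod_eq_zero hc)
    obtain ⟨q, r, e, hr1, hr2, hrne'⟩ : ∃ q r : Int, d = x * q + r ∧ 1 ≤ r ∧ r < x ∧ r ≠ 0 :=
      ⟨d / x, d % x, by omega, by omega, hrx, hrne⟩
    subst e
    have h1 : (x * q + r) / x = q := by
      rw [add_comm, Int.add_mul_ediv_left _ _ (by omega : x ≠ 0),
        Int.ediv_eq_zero_of_lt (by omega) (by omega)]
      omega
    have h2 : (x * q + r - 1) / x = q := by
      have e2 : x * q + r - 1 = (r - 1) + x * q := by ring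
      rw [e2, Int.add_mul_ediv_left _ _ (by omega : x ≠ 0),
        Int.ediv_eq_zero_of_lt (by omega) (by omega)]
      omega
    rw [h1, h2, if_neg h]
    omega

-- A's loop: peeling the last value d off the range 1..d
theorem funcLoop_step (k l m n d c h : Int) (hc : c ≤ d) :
    funcLoop k l m n d c h =
      funcLoop k l m n (d - 1) c h + (if hitP k l m n d then 1 else 0) := by
  by_cases hcd : c = d
  · subst hcd
    rw [funcLoop, dif_pos (le_refl c)]
    rw [funcLoop, dif_neg (by omega : ¬ c + 1 ≤ c)]
    rw [funcLoop, dif_neg (by omega : ¬ c ≤ c - 1)]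
    unfold hitP
    split_ifs <;> omega
  · rw [funcLoop, dif_pos hc]
    rw [show funcLoop k l m n (d - 1) c h =
        funcLoop k l m n (d - 1) (c + 1)
          (if PySem.Int.mod c k = 0 ∨ PySem.Int.mod c m = 0 ∨ PySem.Int.mod c n = 0 ∨ PySem.Int.mod c l = 0
           then h + 1 else h) from by rw [funcLoop, dif_pos (by omega : c ≤ d - 1)]]
    exact funcLoop_step k l m n d (c + 1) _ (by omega)
termination_by (d - c).toNat
decreasing_by omega

-- B's closed form: the same peeling, by 15 applications of cnt_step
theorem func_alt_body_step (k l m n d : Int)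
    (hk : k ≠ 0) (hl : l ≠ 0) (hm : m ≠ 0) (hn : n ≠ 0) :
    (let cnt := fun x => PySem.Int.floordiv d x
     cnt |k| + cnt |l| + cnt |m| + cnt |n|
      - cnt (pyLcm k l) - cnt (pyLcm k m) - cnt (pyLcm k n)
      - cnt (pyLcm l m) - cnt (pyLcm l n) - cnt (pyLcm m n)
      + cnt (pyLcm (pyLcm k l) m) + cnt (pyLcm (pyLcm k l) n)
      + cnt (pyLcm (pyLcm k m) n) + cnt (pyLcm (pyLcm l m) n)
      - cnt (pyLcm (pyLcm (pyLcm k l) m) n)) =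
    (let cnt := fun x => PySem.Int.floordiv (d - 1) x
     cnt |k| + cnt |l| + cnt |m| + cnt |n|
      - cnt (pyLcm k l) - cnt (pyLcm k m) - cnt (pyLcm k n)
      - cnt (pyLcm l m) - cnt (pyLcm l n) - cnt (pyLcm m n)
      + cnt (pyLcm (pyLcm k l) m) + cnt (pyLcm (pyLcm k l) n)
      + cnt (pyLcm (pyLcm k m) n) + cnt (pyLcm (pyLcm l m) n)
      - cnt (pyLcm (pyLcm (pyLcm k l) m) n)) + (if hitP k l m n d then 1 else 0) := by
  have hkl := pyLcm_ne_zero k l hk hl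
  have hkm := pyLcm_ne_zero k m hk hm
  have hkn := pyLcm_ne_zero k n hk hn
  have hlm := pyLcm_ne_zero l m hl hm
  have hln := pyLcm_ne_zero l n hl hn
  have hmn := pyLcm_ne_zero m n hm hn
  have hklm := pyLcm_ne_zero _ m hkl hm
  have hkln := pyLcm_ne_zero _ n hkl hn
  have hkmn := pyLcm_ne_zero _ n hkm hn
  have hlmn := pyLcm_ne_zero _ n hlm hn
  simp only []
  rw [cnt_step d |k| (by simpa using abs_pos.mpr hk),
      cnt_step d |l| (by simpa using abs_pos.mpr hl),
      cnt_step d |m| (by simpa using abs_pos.mpr hm),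
      cnt_step d |n| (by simpa using abs_pos.mpr hn),
      cnt_step d _ (pyLcm_pos k l hk hl),
      cnt_step d _ (pyLcm_pos k m hk hm),
      cnt_step d _ (pyLcm_pos k n hk hn),
      cnt_step d _ (pyLcm_pos l m hl hm),
      cnt_step d _ (pyLcm_pos l n hl hn),
      cnt_step d _ (pyLcm_pos m n hm hn),
      cnt_step d _ (pyLcm_pos _ m hkl hm),
      cnt_step d _ (pyLcm_pos _ n hkl hn),
      cnt_step d _ (pyLcm_pos _ n hkm hn),
      cnt_step d _ (pyLcm_pos _ n hlm hn),
      cnt_step d _ (pyLcm_pos _ n hklm hn)]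
  simp only [pyLcm_dvd_iff _ _ _ hk hl, pyLcm_dvd_iff _ _ _ hk hm, pyLcm_dvd_iff _ _ _ hk hn,
    pyLcm_dvd_iff _ _ _ hl hm, pyLcm_dvd_iff _ _ _ hl hn, pyLcm_dvd_iff _ _ _ hm hn,
    pyLcm_dvd_iff _ _ _ hkl hm, pyLcm_dvd_iff _ _ _ hkl hn, pyLcm_dvd_iff _ _ _ hkm hn,
    pyLcm_dvd_iff _ _ _ hlm hn, pyLcm_dvd_iff _ _ _ hklm hn, abs_dvd]
  unfold hitP
  simp only [PySem.Int.mod_eq_zero_iff_dvd]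
  by_cases h1 : k ∣ d <;> by_cases h2 : l ∣ d <;> by_cases h3 : m ∣ d <;> by_cases h4 : n ∣ d <;>
    simp [h1, h2, h3, h4] <;> ring

theorem func_alt_step (k l m n d : Int) (hd : 1 ≤ d)
    (hk : k ≠ 0) (hl : l ≠ 0) (hm : m ≠ 0) (hn : n ≠ 0) :
    func_alt k l m n d = func_alt k l m n (d - 1) + (if hitP k l m n d then 1 else 0) := by
  unfold func_alt
  rw [if_neg (by omega : ¬ d ≤ 0)]
  rw [func_alt_body_step k l m n d hk hl hm hn]
  by_cases hd1 : d - 1 ≤ 0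
  · have hd0 : d = 1 := by omega
    subst hd0
    rw [if_pos (by omega : (1 : Int) - 1 ≤ 0)]
    norm_num
    simp [PySem.Int.floordiv]
  · rw [if_neg hd1]

theorem main_eq (t : Nat) : ∀ (k l m n d : Int), d ≤ (t : Int) →
    (1 ≤ d → (k ≠ 0 ∧ l ≠ 0 ∧ m ≠ 0 ∧ n ≠ 0)) →
    func k l m n d = func_alt k l m n d := by
  induction t with
  | zero =>
    intro k l m n d hdt _hpre
    have hd : d ≤ 0 := by omega
    unfold func
    rw [funcLoop, dif_neg (by omega : ¬ (1 : Int) ≤ d)]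
    unfold func_alt
    rw [if_pos hd]
  | succ t ih =>
    intro k l m n d hdt hpre
    by_cases hd : d ≤ 0
    · unfold func
      rw [funcLoop, dif_neg (by omega : ¬ (1 : Int) ≤ d)]
      unfold func_alt
      rw [if_pos hd]
    · obtain ⟨hk, hl, hm, hn⟩ := hpre (by omega)
      have hA : func k l m n d = func k l m n (d - 1) + (if hitP k l m n d then 1 else 0) := by
        unfold func
        exact funcLoop_step k l m n d 1 0 (by omega)
      have hB := func_alt_step k l m n d (by omega) hk hl hm hn
      rw [hA, hB, ih k l m n (d - 1) (by omega) (fun h => ⟨hk, hl, hm, hn⟩)]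

-- ===== VERDICT (by name: the statement is the Claim_ definition above) =====
theorem func_spec : Claim_equal_func := by
  intro k l m n d _hdom hpre
  unfold Spec_func Pre_func at *
  exact main_eq (d.toNat) k l m n d (by omega) hpre
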